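-- pv_equiv track=rewrite | github.com/JulianALZ/TP1 | src/main.py | reshape_predictions_using_position
-- ===== SOURCE A (Python) =====
-- def reshape_predictions_using_position(predictions, X_test):
--     reshaped_predictions = []
--     sentence_predictions = []
--
--     for i, feature_dict in enumerate(X_test):
--         sentence_predictions.append(predictions[i])
--         if i < len(X_test) - 1 and X_test[i + 1]['position'] == 0:
--             reshaped_predictions.append(sentence_predictions)
--             sentence_predictions = []
--     # Ajouter les prédictions de la dernière phrase
--     if sentence_predictions:
--         reshaped_predictions.append(sentence_predictions)
--
--     return reshaped_predictions
-- ===== SOURCE B (Python) =====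
-- def reshape_predictions_using_position(predictions, X_test):
--     n = len(X_test)
--     if n == 0:
--         return []
--     # stage 1: indices where a new sentence starts
--     starts = [0] + [i for i in range(1, n) if X_test[i]['position'] == 0]
--     # stage 2: slice the predictions between consecutive starts
--     return [predictions[a:b] for a, b in zip(starts, starts[1:] + [n])]
-- ===== Notes on version B (the rewrite author's own statement) =====
-- stated objective: alternative
-- what changed: B is staged: it first computes the list of sentence-start indices (0 plus every index whose 'position' is 0), then builds the result by slicing predictions between consecutive start indices, instead of A's single pass that accumulates a buffer and flushes it on a look-ahead at X_test[i+1].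
import Mathlib
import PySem

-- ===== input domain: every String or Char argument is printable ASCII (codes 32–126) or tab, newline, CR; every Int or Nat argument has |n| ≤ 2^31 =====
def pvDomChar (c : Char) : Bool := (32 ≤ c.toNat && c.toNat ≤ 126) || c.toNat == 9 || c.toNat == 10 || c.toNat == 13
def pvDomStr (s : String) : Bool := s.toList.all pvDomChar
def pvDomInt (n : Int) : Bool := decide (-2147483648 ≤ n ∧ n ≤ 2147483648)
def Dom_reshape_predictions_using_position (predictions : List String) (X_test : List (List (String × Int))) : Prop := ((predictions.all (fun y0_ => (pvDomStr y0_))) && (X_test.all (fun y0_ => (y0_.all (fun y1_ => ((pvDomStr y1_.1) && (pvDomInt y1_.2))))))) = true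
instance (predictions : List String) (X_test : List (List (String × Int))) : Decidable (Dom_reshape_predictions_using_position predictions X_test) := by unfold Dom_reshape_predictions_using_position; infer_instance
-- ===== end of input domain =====

-- B is staged — first the list of sentence-start indices, then slices of predictions between
-- consecutive starts — instead of A's single buffered pass with a look-ahead at X_test[i+1].


-- ===== PORT A =====
-- loop of A: iterate over the remaining elements of X_test (index i), appending predictions[i]
-- to the current sentence and flushing it when the NEXT element's 'position' is 0.
def pvAGo (predictions : List String) (X_test : List (List (String × Int)))
    (l : List (List (String × Int))) (i : Nat)
    (res : List (List String)) (buf : List String) : List (List String) :=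
  match l with
  | [] =>
      -- «if sentence_predictions: reshaped_predictions.append(sentence_predictions)»
      if buf ≠ [] then res ++ [buf] else res
  | _ :: rest =>
      let buf' := buf ++ [(PySem.List.pyGet? predictions (Int.ofNat i)).getD ""]
      if i + 1 < X_test.length ∧ (PySem.Dict.mk (X_test.getD (i + 1) [])).get? "position" = some (0 : Int) then
        pvAGo predictions X_test rest (i + 1) (res ++ [buf']) []
      else
        pvAGo predictions X_test rest (i + 1) res buf'

def reshape_predictions_using_position (predictions : List String) (X_test : List (List (String × Int))) : List (List String) :=
  pvAGo predictions X_test X_test 0 [] []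

-- ===== PORT B =====
-- B (Source B): n = len(X_test); if n == 0 return [];
-- starts = [0] + [i for i in range(1, n) if X_test[i]['position'] == 0];
-- return [predictions[a:b] for a, b in zip(starts, starts[1:] + [n])]
def reshape_predictions_using_position_alt (predictions : List String) (X_test : List (List (String × Int))) : List (List String) :=
  let n : Int := X_test.length
  if X_test.length = 0 then []
  else
    let starts : List Int :=
      0 :: (PySem.List.pyRange 1 n 1).filter
        (fun i => (PySem.Dict.mk ((PySem.List.pyGet? X_test i).getD [])).get? "position" == some (0 : Int))
    (starts.zip (PySem.List.slice starts (some 1) none ++ [n])).map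
      (fun ab => PySem.List.slice predictions (some ab.1) (some ab.2))

-- ===== PRECONDITION & SPEC =====
-- Pre_ = exactly the inputs on which A returns: predictions covers every index of X_test
-- (else IndexError) and every X_test element after the first has a 'position' key (else KeyError).
def Pre_reshape_predictions_using_position (predictions : List String) (X_test : List (List (String × Int))) : Prop :=
  X_test.length ≤ predictions.length ∧
    ∀ fd ∈ X_test.drop 1, ((PySem.Dict.mk fd).get? "position").isSome = true
instance (predictions : List String) (X_test : List (List (String × Int))) : Decidable (Pre_reshape_predictions_using_position predictions X_test) := by unfold Pre_reshape_predictions_using_position; infer_instance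

def pvWitness_reshape_predictions_using_position : List String × (List (List (String × Int))) :=
  (["a", "b", "c"], [[("position", 0)], [("position", 1)], [("position", 0)]])

def Spec_reshape_predictions_using_position (predictions : List String) (X_test : List (List (String × Int))) (out : List (List String)) : Prop := out = reshape_predictions_using_position_alt predictions X_test
instance (predictions : List String) (X_test : List (List (String × Int))) (out : List (List String)) : Decidable (Spec_reshape_predictions_using_position predictions X_test out) := by unfold Spec_reshape_predictions_using_position; infer_instance

-- ===== CLAIM (what is proved, stated in full; the proofs are below) =====
def Claim_equal_reshape_predictions_using_position : Prop := ∀ (predictions : List String) (X_test : List (List (String × Int))), Dom_reshape_predictions_using_position predictions X_test → Pre_reshape_predictions_using_position predictions X_test → Spec_reshape_predictions_using_position predictions X_test (reshape_predictions_using_position predictions X_test)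

-- ===== LEMMAS AND PROOFS =====

-- the chunking of predictions determined by a start index a and the later start indices ss (end n)
def pvChunks (predictions : List String) (n : Int) (a : Int) (ss : List Int) : List (List String) :=
  match ss with
  | [] => [PySem.List.slice predictions (some a) (some n)]
  | b :: ss' => PySem.List.slice predictions (some a) (some b) :: pvChunks predictions n b ss'

-- B's zip/map over a non-empty starts list is exactly pvChunks
theorem pvB_chunks (predictions : List String) (n : Int) :
    ∀ (ss : List Int) (a : Int),
      ((a :: ss).zip (PySem.List.slice (a :: ss) (some 1) none ++ [n])).map
          (fun ab => PySem.List.slice predictions (some ab.1) (some ab.2))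
        = pvChunks predictions n a ss := by
  intro ss
  induction ss with
  | nil => intro a; simp [pvChunks, PySem.List.slice_from_one]
  | cons b ss' ih =>
      intro a
      have := ih b
      simp [pvChunks, PySem.List.slice_from_one] at this ⊢
      exact this

theorem pvGo_chunks (predictions : List String) (X_test : List (List (String × Int)))
    (hlen : X_test.length ≤ predictions.length) :
    ∀ (l : List (List (String × Int))) (i a : Nat) (res : List (List String)),
      l = X_test.drop i → a ≤ i → i ≤ X_test.length → a < X_test.length →
      pvAGo predictions X_test l i res
          ((predictions.drop a).take (i - a))
        = res ++ pvChunks predictions (X_test.length : Int) (a : Int)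
            ((PySem.List.pyRange ((i : Int) + 1) (X_test.length : Int) 1).filter
              (fun j => (PySem.Dict.mk ((PySem.List.pyGet? X_test j).getD [])).get? "position" == some (0 : Int))) := by
  intro l
  induction l with
  | nil =>
      intro i a res hdrop hai hiN haN
      have hiN' : X_test.length ≤ i := List.drop_eq_nil_iff.mp hdrop.symm
      have hin : i = X_test.length := by omega
      subst hin
      have hbuf : (predictions.drop a).take (X_test.length - a) ≠ [] := by
        simp [List.take_eq_nil_iff]
        omega
      rw [PySem.List.pyRange_one_eq_nil (by omega)]
      simp only [List.filter_nil, pvChunks, pvAGo, if_pos hbuf]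
      rw [PySem.List.slice_natCast]
  | cons fd rest ih =>
      intro i a res hdrop hai hiN haN
      have hi : i < X_test.length := by
        by_contra h
        rw [List.drop_eq_nil_of_le (by omega)] at hdrop
        simp at hdrop
      have hrest : rest = X_test.drop (i + 1) := by
        have := congrArg List.tail hdrop
        simpa [List.tail_drop] using this
      have hlenp : i < predictions.length := by omega
      -- the appended element is predictions[i]
      have hbuf' : (predictions.drop a).take (i - a) ++ [(PySem.List.pyGet? predictions (Int.ofNat i)).getD ""] =
          (predictions.drop a).take (i + 1 - a) := by
        have h1 : PySem.List.pyGet? predictions (Int.ofNat i) = predictions[i]? :=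
          PySem.List.pyGet?_natCast predictions i
        have h2 : (predictions.drop a)[i - a]? = some predictions[i] := by
          rw [List.getElem?_drop]
          rw [List.getElem?_eq_getElem (by omega)]
          congr 1
          congr 1
          omega
        have h3 : i + 1 - a = (i - a) + 1 := by omega
        rw [h3, List.take_add_one, h2, h1, List.getElem?_eq_getElem hlenp]
        rfl
      rw [pvAGo]
      simp only [hbuf']
      by_cases hend : i + 1 = X_test.length
      · -- last element: no flush, loop ends
        have hnf : ¬ (i + 1 < X_test.length ∧ (PySem.Dict.mk (X_test.getD (i + 1) [])).get? "position" = some (0 : Int)) := by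
          intro ⟨h, _⟩; omega
        rw [if_neg hnf]
        have hrest0 : rest = [] := by rw [hrest]; exact List.drop_eq_nil_of_le (by omega)
        subst hrest0
        have hbufne : (predictions.drop a).take (i + 1 - a) ≠ [] := by
          simp [List.take_eq_nil_iff]; omega
        rw [pvAGo, if_pos hbufne]
        rw [PySem.List.pyRange_one_eq_nil (by omega)]
        simp only [List.filter_nil, pvChunks]
        rw [PySem.List.slice_natCast, hend]
      · have hi1 : i + 1 < X_test.length := by omega
        -- head of the remaining range is i+1
        have hcons : PySem.List.pyRange ((i : Int) + 1) (X_test.length : Int) 1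
            = ((i : Int) + 1) :: PySem.List.pyRange ((i : Int) + 1 + 1) (X_test.length : Int) 1 := by
          exact PySem.List.pyRange_one_cons (by omega)
        have hget : (PySem.List.pyGet? X_test ((i : Int) + 1)).getD [] = X_test.getD (i + 1) [] := by
          have h1 : ((i : Int) + 1) = ((i + 1 : Nat) : Int) := by push_cast; ring
          rw [h1]
          have h2 : PySem.List.pyGet? X_test ((i + 1 : Nat) : Int) = X_test[i + 1]? :=
            PySem.List.pyGet?_natCast X_test (i + 1)
          rw [h2, List.getD_eq_getElem?_getD]
        rw [hcons]
        by_cases hP : (PySem.Dict.mk (X_test.getD (i + 1) [])).get? "position" = some (0 : Int)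
        · -- B records a start at i+1; A flushes after element i
          rw [if_pos ⟨hi1, hP⟩]
          rw [List.filter_cons_of_pos (by simp only [beq_iff_eq]; rw [hget]; exact hP)]
          have hz : ((predictions.drop (i + 1)).take ((i + 1) - (i + 1))) = ([] : List String) := by simp
          have := ih (i + 1) (i + 1) (res ++ [(predictions.drop a).take (i + 1 - a)]) hrest (le_refl _) (by omega) hi1
          rw [hz] at this
          rw [this]
          simp only [pvChunks]
          rw [show ((i : Int) + 1) = ((i + 1 : Nat) : Int) by push_cast; ring,
            PySem.List.slice_natCast]
          simp
        · rw [if_neg (by intro ⟨_, h⟩; exact hP h)]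
          rw [List.filter_cons_of_neg (by simp only [beq_iff_eq]; rw [hget]; exact hP)]
          have := ih (i + 1) a res hrest (by omega) (by omega) haN
          rw [show ((i + 1 : Nat) : Int) + 1 = (i : Int) + 1 + 1 by push_cast; ring] at this
          exact this

-- ===== VERDICT (by name: the statement is the Claim_ definition above) =====
theorem reshape_predictions_using_position_spec : Claim_equal_reshape_predictions_using_position := by
  intro predictions X_test _ hpre
  unfold Spec_reshape_predictions_using_position reshape_predictions_using_position reshape_predictions_using_position_alt
  by_cases h0 : X_test.length = 0
  · have hnil : X_test = [] := List.eq_nil_of_length_eq_zero h0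
    subst hnil
    simp [pvAGo]
  · simp only [if_neg h0]
    rw [pvB_chunks]
    have h := pvGo_chunks predictions X_test hpre.1 X_test 0 0 [] (by simp) (le_refl 0) (by omega) (by omega)
    simpa using h
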